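-- pv_equiv track=rewrite | github.com/AkmalFazli27/Unchdeep | SEMESTER-1/Dasar-Pemprograman/PRAKTIKUM/RESPONSI/matematika_gura.py | BesarMana
-- ===== SOURCE A (Python) =====
-- def first_elmt(L):
--     return L[0]
--
-- def tail(L):
--     return L[1:]
--
-- def is_empty(L):
--     return len(L) == 0
--
-- def BesarMana(X,Y,tandaX,tandaY):
--     if is_empty(X):
--         return []
--     else:
--         if first_elmt(X) > first_elmt(Y):
--             if tandaX == '+':
--                 return []
--             return [tandaX]
--         elif first_elmt(Y) > first_elmt(X):
--             if tandaY == '+':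
--                 return []
--             return [tandaY]
--         return BesarMana(tail(X),tail(Y),tandaX,tandaY)
-- ===== SOURCE B (Python) =====
-- def BesarMana(X, Y, tandaX, tandaY):
--     for i in range(len(X)):
--         if X[i] > Y[i]:
--             return [] if tandaX == '+' else [tandaX]
--         if Y[i] > X[i]:
--             return [] if tandaY == '+' else [tandaY]
--     return []
-- ===== Notes on version B (the rewrite author's own statement) =====
-- stated objective: faster
-- what changed: The recursive scan built on the helper functions first_elmt/tail/is_empty (whose tail(L)=L[1:] copies the remaining list at every step, plus Python recursion depth limits) is replaced by a single indexed for-loop with early returns and no helpers; Y[i] is still indexed directly so the IndexError on a strictly shorter all-equal Y is preserved (those inputs are outside Pre_).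
import Mathlib
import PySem

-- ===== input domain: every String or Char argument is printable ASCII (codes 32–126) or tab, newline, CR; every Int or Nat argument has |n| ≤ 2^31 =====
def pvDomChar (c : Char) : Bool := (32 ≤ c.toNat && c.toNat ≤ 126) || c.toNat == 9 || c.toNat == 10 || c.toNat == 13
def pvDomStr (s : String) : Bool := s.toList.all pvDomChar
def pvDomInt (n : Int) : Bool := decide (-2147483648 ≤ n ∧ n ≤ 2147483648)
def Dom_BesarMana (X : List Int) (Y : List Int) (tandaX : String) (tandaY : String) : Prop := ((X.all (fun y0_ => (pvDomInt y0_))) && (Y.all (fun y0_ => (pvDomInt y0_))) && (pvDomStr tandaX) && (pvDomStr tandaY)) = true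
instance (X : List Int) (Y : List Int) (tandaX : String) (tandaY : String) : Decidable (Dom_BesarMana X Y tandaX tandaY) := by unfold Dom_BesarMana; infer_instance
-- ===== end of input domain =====

-- B rewrites A's helper-based recursion (first_elmt/tail/is_empty) as one indexed for-loop
-- with early returns, avoiding the per-step list copy of tail(L)=L[1:]; same values everywhere A returns (objective: faster, measured).

-- ===== PORT A =====
-- first_elmt(L) = L[0] (IndexError on []), tail(L) = L[1:], is_empty(L) = len(L)==0.
-- The Y = [] branch below is where Python raises IndexError; it is excluded by Pre_BesarMana.
def BesarMana (X : List Int) (Y : List Int) (tandaX : String) (tandaY : String) : List String :=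
  match X with
  | [] => []
  | x :: xs =>
    match Y with
    | [] => []  -- first_elmt(Y) raises IndexError here (outside Pre_)
    | y :: ys =>
      if x > y then (if tandaX = "+" then [] else [tandaX])
      else if y > x then (if tandaY = "+" then [] else [tandaY])
      else BesarMana xs ys tandaX tandaY

-- ===== PORT B =====
-- the body of `for i in range(len(X))`, recursing over the index list;
-- the `none` case for Y[i]? is Python's IndexError (outside Pre_)
def besarManaLoop (X : List Int) (Y : List Int) (tandaX : String) (tandaY : String) : List Nat → List String
  | [] => []
  | i :: rest =>
    match X[i]?, Y[i]? with
    | some x, some y =>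
      if x > y then (if tandaX = "+" then [] else [tandaX])
      else if y > x then (if tandaY = "+" then [] else [tandaY])
      else besarManaLoop X Y tandaX tandaY rest
    | _, _ => []  -- IndexError (outside Pre_)

def BesarMana_alt (X : List Int) (Y : List Int) (tandaX : String) (tandaY : String) : List String :=
  besarManaLoop X Y tandaX tandaY (List.range X.length)

-- ===== PRECONDITION & SPEC =====
-- Pre_ excludes exactly the inputs where A (and B) raise IndexError:
-- X strictly longer than Y with X and Y equal on all of Y's positions.
def Pre_BesarMana (X : List Int) (Y : List Int) (tandaX : String) (tandaY : String) : Prop :=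
  X.length ≤ Y.length ∨ ∃ i < min X.length Y.length, X.getD i 0 ≠ Y.getD i 0

instance (X : List Int) (Y : List Int) (tandaX : String) (tandaY : String) : Decidable (Pre_BesarMana X Y tandaX tandaY) := by unfold Pre_BesarMana; infer_instance

def pvWitness_BesarMana : List Int × List Int × String × String := ([1, 2], [1, 3], "+", "-")

def Spec_BesarMana (X : List Int) (Y : List Int) (tandaX : String) (tandaY : String) (out : List String) : Prop := out = BesarMana_alt X Y tandaX tandaY
instance (X : List Int) (Y : List Int) (tandaX : String) (tandaY : String) (out : List String) : Decidable (Spec_BesarMana X Y tandaX tandaY out) := by unfold Spec_BesarMana; infer_instance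

-- ===== CLAIM (what is proved, stated in full; the proofs are below) =====
def Claim_equal_BesarMana : Prop := ∀ (X : List Int) (Y : List Int) (tandaX : String) (tandaY : String), Dom_BesarMana X Y tandaX tandaY → Pre_BesarMana X Y tandaX tandaY → Spec_BesarMana X Y tandaX tandaY (BesarMana X Y tandaX tandaY)

-- ===== LEMMAS AND PROOFS =====

-- shifting every index by one steps both lists by one
theorem besarManaLoop_shift (x y : Int) (xs ys : List Int) (tX tY : String) :
    ∀ R : List Nat, besarManaLoop (x :: xs) (y :: ys) tX tY (R.map (· + 1)) =
      besarManaLoop xs ys tX tY R := by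
  intro R
  induction R with
  | nil => rfl
  | cons i rest ih =>
    simp only [List.map_cons, besarManaLoop, List.getElem?_cons_succ]
    cases hx : xs[i]? <;> cases hy : ys[i]? <;> simp [ih]

theorem Pre_tail (x y : Int) (xs ys : List Int) (tX tY : String)
    (hxy : x = y) (h : Pre_BesarMana (x :: xs) (y :: ys) tX tY) :
    Pre_BesarMana xs ys tX tY := by
  rcases h with h | ⟨i, hi, hne⟩
  · exact Or.inl (by simpa using h)
  · cases i with
    | zero => simp [hxy] at hne
    | succ j =>
      refine Or.inr ⟨j, by simp at hi ⊢; omega, ?_⟩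
      simpa using hne

theorem BesarMana_eq_alt (tX tY : String) :
    ∀ (X Y : List Int), Pre_BesarMana X Y tX tY →
      BesarMana X Y tX tY = BesarMana_alt X Y tX tY := by
  intro X
  induction X with
  | nil => intro Y _; rfl
  | cons x xs ih =>
    intro Y hpre
    cases Y with
    | nil =>
      rcases hpre with h | ⟨i, hi, _⟩
      · simp at h
      · simp at hi
    | cons y ys =>
      show BesarMana (x :: xs) (y :: ys) tX tY = BesarMana_alt (x :: xs) (y :: ys) tX tY
      unfold BesarMana BesarMana_alt
      rw [List.length_cons, List.range_succ_eq_map]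
      have hmap : (List.range xs.length).map Nat.succ = (List.range xs.length).map (· + 1) := by
        simp
      simp only [besarManaLoop, List.getElem?_cons_zero]
      by_cases h1 : x > y
      · simp [h1]
      · by_cases h2 : y > x
        · simp [h1, h2]
        · have hxy : x = y := le_antisymm (not_lt.mp h1) (not_lt.mp h2)
          simp only [h1, h2, ite_false]
          rw [hmap, besarManaLoop_shift]
          exact ih ys (Pre_tail x y xs ys tX tY hxy hpre)

-- ===== VERDICT (by name: the statement is the Claim_ definition above) =====
theorem BesarMana_spec : Claim_equal_BesarMana := by
  intro X Y tX tY _ hpre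
  exact BesarMana_eq_alt tX tY X Y hpre
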